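-- pv_equiv track=rewrite | github.com/MaximumBeings/GoogleCodingInterviewQuestions | maximumFrequency.py | maximumFrequency
-- ===== SOURCE A (Python) =====
-- input =[[1,1,1],
--         [2,3,3],
--         [4,5,3]]
--
-- def maximumFrequency(input):
--     count = dict()
--     sum = 0
--     for x in input:
--         for y in x:
--             try:
--                 count[y] = count[y] + 1
--             except:
--                 count[y] = 1
--
--     maximum = max(count.values())
--     for item in count:
--         if count[item] == maximum:
--             sum = sum + (item * count[item])
--     return sum
-- ===== SOURCE B (Python) =====
-- def maximumFrequency(input):
--     count = {}
--     best = 0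
--     total = 0
--     for x in input:
--         for y in x:
--             c = count.get(y, 0) + 1
--             count[y] = c
--             if c > best:
--                 best = c
--                 total = y
--             elif c == best:
--                 total = total + y
--     return best * total
-- ===== Notes on version B (the rewrite author's own statement) =====
-- stated objective: alternative
-- what changed: B keeps a running maximum frequency and the running sum of items currently at that frequency while counting, so the max() over the values and the second filter-sum pass over the dict disappear; it returns best*total in a single pass.
import Mathlib
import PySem

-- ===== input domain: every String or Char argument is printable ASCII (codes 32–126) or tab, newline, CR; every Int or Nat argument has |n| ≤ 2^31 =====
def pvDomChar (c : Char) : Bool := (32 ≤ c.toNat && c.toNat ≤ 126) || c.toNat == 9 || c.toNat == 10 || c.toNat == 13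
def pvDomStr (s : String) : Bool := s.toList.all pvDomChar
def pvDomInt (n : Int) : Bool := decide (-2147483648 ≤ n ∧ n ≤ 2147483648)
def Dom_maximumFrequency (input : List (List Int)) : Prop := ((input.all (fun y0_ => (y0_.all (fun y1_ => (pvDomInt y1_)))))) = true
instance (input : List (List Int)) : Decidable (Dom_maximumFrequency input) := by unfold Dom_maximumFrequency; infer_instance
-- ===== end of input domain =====

-- B replaces A's count-then-max-then-rescan with a single counting pass that tracks the running
-- maximum frequency and the running sum of items currently at that frequency (objective: alternative).

-- ===== PORT A =====
def maximumFrequency (input : List (List Int)) : Int :=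
  let count : PySem.Dict Int Int :=
    input.foldl (fun d x =>
      x.foldl (fun d y =>
        match d.get? y with          -- try: count[y] = count[y] + 1 / except: count[y] = 1
        | some c => d.insert y (c + 1)
        | none   => d.insert y 1) d) PySem.Dict.empty
  match PySem.List.max? count.values (fun v => v) with
  | some maximum =>
      count.keys.foldl (fun s item =>
        if count.getD item 0 == maximum then s + item * count.getD item 0 else s) 0
  | none => 0    -- unreachable inside Pre_: max([]) raises ValueError in Python

-- ===== PORT B =====
def maximumFrequency_alt (input : List (List Int)) : Int :=
  let st :=
    input.foldl (fun st x =>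
      x.foldl (fun st y =>
        let c := st.1.getD y 0 + 1
        let d := st.1.insert y c
        if c > st.2.1 then (d, c, y)
        else if c == st.2.1 then (d, st.2.1, st.2.2 + y)
        else (d, st.2.1, st.2.2)) st)
      ((PySem.Dict.empty : PySem.Dict Int Int), (0 : Int), (0 : Int))
  st.2.1 * st.2.2

-- ===== PRECONDITION & SPEC =====
-- Pre_ excludes exactly the inputs whose flattened contents are empty: there A's max() over an
-- empty dict raises ValueError.
def Pre_maximumFrequency (input : List (List Int)) : Prop := input.flatten ≠ []
instance (input : List (List Int)) : Decidable (Pre_maximumFrequency input) := by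
  unfold Pre_maximumFrequency; infer_instance
def pvWitness_maximumFrequency : List (List Int) := [[1, 1, 1], [2, 3, 3], [4, 5, 3]]

def Spec_maximumFrequency (input : List (List Int)) (out : Int) : Prop := out = maximumFrequency_alt input
instance (input : List (List Int)) (out : Int) : Decidable (Spec_maximumFrequency input out) := by
  unfold Spec_maximumFrequency; infer_instance

-- ===== CLAIM (what is proved, stated in full; the proofs are below) =====
def Claim_equal_maximumFrequency : Prop := ∀ (input : List (List Int)), Dom_maximumFrequency input → Pre_maximumFrequency input → Spec_maximumFrequency input (maximumFrequency input)

-- ===== LEMMAS AND PROOFS =====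

-- the multiplicity of k, the maximal multiplicity, and the sum of the keys attaining it
def pvCnt (ys : List Int) (k : Int) : Int := (ys.count k : Int)
def pvMx (ys : List Int) : Int := (PySem.List.dedup ys).foldl (fun m k => max m (pvCnt ys k)) 0
def pvSm (ys : List Int) : Int := ((PySem.List.dedup ys).filter (fun k => pvCnt ys k == pvMx ys)).sum

theorem pv_foldl_nested {α β : Type} (f : β → α → β) (input : List (List α)) (init : β) :
    input.foldl (fun st x => x.foldl f st) init = input.flatten.foldl f init := by
  induction input generalizing init with
  | nil => rfl
  | cons x xs ih => simp [List.foldl_append, ih]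

theorem pvCnt_append (ys : List Int) (y k : Int) :
    pvCnt (ys ++ [y]) k = pvCnt ys k + (if k = y then 1 else 0) := by
  by_cases h : k = y <;> simp [pvCnt, List.count_append, h, List.count_eq_zero]

theorem pvCnt_pos (ys : List Int) (k : Int) (h : k ∈ ys) : 1 ≤ pvCnt ys k := by
  have := List.count_pos_iff.mpr h
  simp [pvCnt]; omega

theorem pvCnt_eq_zero (ys : List Int) (k : Int) (h : k ∉ ys) : pvCnt ys k = 0 := by
  simp [pvCnt, List.count_eq_zero.mpr h]

theorem pv_dedup_append (ys : List Int) (y : Int) :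
    PySem.List.dedup (ys ++ [y]) =
      if y ∈ ys then PySem.List.dedup ys else PySem.List.dedup ys ++ [y] := by
  simp only [PySem.List.dedup_eq_ofList, PySem.Set.ofList_eq_foldl, List.foldl_append,
    List.foldl_cons, List.foldl_nil]
  rw [← PySem.Set.ofList_eq_foldl, PySem.Set.add]
  by_cases h : y ∈ ys
  · simp [PySem.Set.contains, PySem.Set.mem_ofList, h]
  · simp [PySem.Set.contains, PySem.Set.mem_ofList, h]

theorem pvMx_nonneg (ys : List Int) : 0 ≤ pvMx ys := by
  exact (PySem.List.le_foldl_max_int (PySem.List.dedup ys) (pvCnt ys) 0).1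

theorem pvCnt_le_pvMx (ys : List Int) (k : Int) : pvCnt ys k ≤ pvMx ys := by
  by_cases h : k ∈ ys
  · exact (PySem.List.le_foldl_max_int (PySem.List.dedup ys) (pvCnt ys) 0).2 k
      ((PySem.List.mem_dedup _ _).mpr h)
  · rw [pvCnt_eq_zero ys k h]; exact pvMx_nonneg ys

theorem pv_foldl_max_cases (f : Int → Int) :
    ∀ (l : List Int) (init : Int),
      l.foldl (fun m k => max m (f k)) init = init ∨
      ∃ k ∈ l, l.foldl (fun m k => max m (f k)) init = f k := by
  intro l
  induction l with
  | nil => intro init; left; rfl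
  | cons a t ih =>
    intro init
    rcases ih (max init (f a)) with h | ⟨k, hk, h⟩
    · rcases max_choice init (f a) with hm | hm
      · left; simp only [List.foldl_cons]; rw [h]; exact hm
      · right; exact ⟨a, List.mem_cons_self, by simp only [List.foldl_cons]; rw [h]; exact hm⟩
    · right; exact ⟨k, List.mem_cons_of_mem _ hk, by simp only [List.foldl_cons]; rw [h]⟩

theorem pvMx_cases (ys : List Int) : pvMx ys = 0 ∨ ∃ k ∈ ys, pvCnt ys k = pvMx ys := by
  rcases pv_foldl_max_cases (pvCnt ys) (PySem.List.dedup ys) 0 with h | ⟨k, hk, h⟩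
  · left; exact h
  · right; exact ⟨k, (PySem.List.mem_dedup _ _).mp hk, h.symm⟩

theorem pvMx_append (ys : List Int) (y : Int) :
    pvMx (ys ++ [y]) =
      if pvMx ys < pvCnt ys y + 1 then pvCnt ys y + 1 else pvMx ys := by
  have h1 : pvCnt (ys ++ [y]) y = pvCnt ys y + 1 := by rw [pvCnt_append]; simp
  have h2 : ∀ k, k ≠ y → pvCnt (ys ++ [y]) k = pvCnt ys k := by
    intro k hk; rw [pvCnt_append]; simp [hk]
  have hc : pvCnt (ys ++ [y]) y ≤ pvMx (ys ++ [y]) := pvCnt_le_pvMx _ y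
  have hle : pvMx ys ≤ pvMx (ys ++ [y]) := by
    rcases pvMx_cases ys with h | ⟨k, hk, h⟩
    · rw [h]; exact pvMx_nonneg _
    · have := pvCnt_le_pvMx (ys ++ [y]) k
      rw [pvCnt_append] at this
      omega
  rcases pvMx_cases (ys ++ [y]) with h | ⟨k, hk, h⟩
  · have := pvCnt_pos (ys ++ [y]) y (by simp)
    omega
  · have hup : pvCnt (ys ++ [y]) k ≤ max (pvMx ys) (pvCnt ys y + 1) := by
      by_cases hky : k = y
      · subst hky; rw [h1]; exact le_max_right _ _
      · rw [h2 k hky]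
        exact le_trans (pvCnt_le_pvMx ys k) (le_max_left _ _)
    rw [h] at hup
    rw [h1] at hc
    rcases max_cases (pvMx ys) (pvCnt ys y + 1) with ⟨hm, hm'⟩ | ⟨hm, hm'⟩ <;>
      rw [hm] at hup <;> split_ifs <;> omega

theorem pv_sum_filter_flip (p q : Int → Bool) (y : Int) :
    ∀ (l : List Int), l.Nodup → y ∈ l → (∀ k, k ≠ y → p k = q k) →
      p y = false → q y = true → (l.filter q).sum = (l.filter p).sum + y := by
  intro l
  induction l with
  | nil => simp
  | cons a t ih =>
    intro hnd hy hpq hp hq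
    rcases List.mem_cons.mp hy with rfl | hyt
    · have hnotin : y ∉ t := (List.nodup_cons.mp hnd).1
      have hft : t.filter p = t.filter q :=
        List.filter_congr (fun k hk => hpq k (fun h => hnotin (h ▸ hk)))
      simp [hp, hq, hft]
      ring
    · have ha : a ≠ y := fun h => (List.nodup_cons.mp hnd).1 (h ▸ hyt)
      have hrec := ih (List.nodup_cons.mp hnd).2 hyt hpq hp hq
      have hpa : p a = q a := hpq a ha
      by_cases hb : q a = true
      · simp [hb, hpa ▸ hb, hrec]
        ring
      · simp [hb, hpa ▸ hb, hrec]

theorem pv_nodup_dedup (ys : List Int) : (PySem.List.dedup ys).Nodup :=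
  PySem.List.nodup_dedup ys

theorem pvSm_append (ys : List Int) (y : Int) :
    pvSm (ys ++ [y]) =
      if pvMx ys < pvCnt ys y + 1 then y
      else if pvCnt ys y + 1 = pvMx ys then pvSm ys + y
      else pvSm ys := by
  have h1 : pvCnt (ys ++ [y]) y = pvCnt ys y + 1 := by rw [pvCnt_append]; simp
  have h2 : ∀ k, k ≠ y → pvCnt (ys ++ [y]) k = pvCnt ys k := fun k hk => by
    rw [pvCnt_append]; simp [hk]
  have hMx := pvMx_append ys y
  unfold pvSm
  rw [pv_dedup_append]
  by_cases hcmp : pvMx ys < pvCnt ys y + 1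
  · have hMx' : pvMx (ys ++ [y]) = pvCnt ys y + 1 := by rw [hMx, if_pos hcmp]
    have hfalse : ∀ k, k ≠ y → (pvCnt (ys ++ [y]) k == pvMx (ys ++ [y])) = false := by
      intro k hk
      have := pvCnt_le_pvMx ys k
      rw [h2 k hk, hMx']
      simp only [beq_eq_false_iff_ne]; omega
    have htrue : (pvCnt (ys ++ [y]) y == pvMx (ys ++ [y])) = true := by
      rw [h1, hMx']; simp
    rw [if_pos hcmp]
    by_cases hy : y ∈ ys
    · rw [if_pos hy]
      have := pv_sum_filter_flip (fun _ => false)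
        (fun k => pvCnt (ys ++ [y]) k == pvMx (ys ++ [y])) y
        (PySem.List.dedup ys) (pv_nodup_dedup ys) ((PySem.List.mem_dedup _ _).mpr hy)
        (fun k hk => (hfalse k hk).symm) rfl htrue
      rw [this]; simp
    · rw [if_neg hy, List.filter_append, List.sum_append]
      have hnil : (PySem.List.dedup ys).filter
          (fun k => pvCnt (ys ++ [y]) k == pvMx (ys ++ [y])) = [] := by
        apply List.filter_eq_nil_iff.mpr
        intro k hk
        have hky : k ≠ y := fun h => hy (h ▸ (PySem.List.mem_dedup _ _).mp hk)
        simp [hfalse k hky]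
      rw [hnil]; simp [htrue]
  · have hMx' : pvMx (ys ++ [y]) = pvMx ys := by rw [hMx, if_neg hcmp]
    have hsame : ∀ k, k ≠ y →
        (pvCnt (ys ++ [y]) k == pvMx (ys ++ [y])) = (pvCnt ys k == pvMx ys) := by
      intro k hk; rw [h2 k hk, hMx']
    rw [if_neg hcmp]
    by_cases heq : pvCnt ys y + 1 = pvMx ys
    · have htrue : (pvCnt (ys ++ [y]) y == pvMx (ys ++ [y])) = true := by
        rw [h1, hMx']; simp [heq]
      have hpy : (pvCnt ys y == pvMx ys) = false := by
        simp only [beq_eq_false_iff_ne]; omega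
      rw [if_pos heq]
      by_cases hy : y ∈ ys
      · rw [if_pos hy]
        exact pv_sum_filter_flip (fun k => pvCnt ys k == pvMx ys)
          (fun k => pvCnt (ys ++ [y]) k == pvMx (ys ++ [y])) y
          (PySem.List.dedup ys) (pv_nodup_dedup ys) ((PySem.List.mem_dedup _ _).mpr hy)
          (fun k hk => (hsame k hk).symm) hpy htrue
      · rw [if_neg hy, List.filter_append, List.sum_append]
        have hcg : (PySem.List.dedup ys).filter
              (fun k => pvCnt (ys ++ [y]) k == pvMx (ys ++ [y]))
            = (PySem.List.dedup ys).filter (fun k => pvCnt ys k == pvMx ys) :=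
          List.filter_congr (fun k hk =>
            hsame k (fun h => hy (h ▸ (PySem.List.mem_dedup _ _).mp hk)))
        rw [hcg]; simp [htrue]
    · have hfy : (pvCnt (ys ++ [y]) y == pvMx (ys ++ [y])) = false := by
        rw [h1, hMx']; simp only [beq_eq_false_iff_ne]; omega
      have hpy : (pvCnt ys y == pvMx ys) = false := by
        have := pvCnt_le_pvMx ys y
        simp only [beq_eq_false_iff_ne]; omega
      rw [if_neg heq]
      by_cases hy : y ∈ ys
      · rw [if_pos hy]
        apply congrArg
        apply List.filter_congr
        intro k hk
        by_cases hky : k = y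
        · subst hky; rw [hfy, hpy]
        · exact hsame k hky
      · rw [if_neg hy, List.filter_append, List.sum_append]
        have hcg : (PySem.List.dedup ys).filter
              (fun k => pvCnt (ys ++ [y]) k == pvMx (ys ++ [y]))
            = (PySem.List.dedup ys).filter (fun k => pvCnt ys k == pvMx ys) :=
          List.filter_congr (fun k hk =>
            hsame k (fun h => hy (h ▸ (PySem.List.mem_dedup _ _).mp hk)))
        rw [hcg]; simp [hfy]

theorem pvB_inv (ys : List Int) :
    ys.foldl (fun (st : PySem.Dict Int Int × Int × Int) y =>
        let c := st.1.getD y 0 + 1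
        let d := st.1.insert y c
        if c > st.2.1 then (d, c, y)
        else if c == st.2.1 then (d, st.2.1, st.2.2 + y)
        else (d, st.2.1, st.2.2))
      ((PySem.Dict.empty : PySem.Dict Int Int), (0 : Int), (0 : Int))
    = (PySem.Dict.counter ys, pvMx ys, pvSm ys) := by
  induction ys using List.reverseRecOn with
  | nil => rfl
  | append_singleton ys y ih =>
    rw [List.foldl_append, ih]
    have hctr : PySem.Dict.counter (ys ++ [y])
        = (PySem.Dict.counter ys).insert y ((PySem.Dict.counter ys).getD y 0 + 1) := by
      rw [← PySem.Dict.foldl_insert_getD_add_one_eq_counter,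
        ← PySem.Dict.foldl_insert_getD_add_one_eq_counter, List.foldl_append]
      rfl
    have hgd : (PySem.Dict.counter ys).getD y 0 = pvCnt ys y := by
      rw [PySem.Dict.getD_counter]; rfl
    simp only [List.foldl_cons, List.foldl_nil, hgd]
    rw [pvMx_append, pvSm_append, hctr, hgd]
    by_cases hgt : pvCnt ys y + 1 > pvMx ys
    · rw [if_pos hgt, if_pos (by omega : pvMx ys < pvCnt ys y + 1),
        if_pos (by omega : pvMx ys < pvCnt ys y + 1)]
    · rw [if_neg hgt, if_neg (by omega : ¬ pvMx ys < pvCnt ys y + 1),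
        if_neg (by omega : ¬ pvMx ys < pvCnt ys y + 1)]
      by_cases heq : pvCnt ys y + 1 = pvMx ys
      · rw [if_pos heq, if_pos (by simp [heq] : (pvCnt ys y + 1 == pvMx ys) = true)]
      · rw [if_neg heq, if_neg (by simp [heq] : ¬ (pvCnt ys y + 1 == pvMx ys) = true)]

theorem pvAlt_val (input : List (List Int)) :
    maximumFrequency_alt input = pvMx input.flatten * pvSm input.flatten := by
  unfold maximumFrequency_alt
  rw [pv_foldl_nested, pvB_inv]

theorem pvA_counter (input : List (List Int)) :
    input.foldl (fun d x =>
      x.foldl (fun (d : PySem.Dict Int Int) y =>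
        match d.get? y with
        | some c => d.insert y (c + 1)
        | none   => d.insert y 1) d) PySem.Dict.empty = PySem.Dict.counter input.flatten := by
  rw [pv_foldl_nested]
  rw [← PySem.Dict.foldl_insert_getD_add_one_eq_counter]
  apply PySem.List.foldl_congr_mem
  intro d y _
  cases h : d.get? y with
  | some c => simp [PySem.Dict.getD_eq_get?_getD, h]
  | none => simp [PySem.Dict.getD_eq_get?_getD, h]

theorem pvA_val (input : List (List Int)) (h : input.flatten ≠ []) :
    maximumFrequency input = pvSm input.flatten * pvMx input.flatten := by
  simp only [maximumFrequency]
  rw [pvA_counter]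
  set ys := input.flatten with hys
  have hvals : (PySem.Dict.counter ys).values
      = (PySem.List.dedup ys).map (fun k => pvCnt ys k) := by
    simp only [PySem.Dict.values, PySem.Dict.items_counter, List.map_map]
    rw [← PySem.List.dedup_eq_ofList]
    rfl
  have hkeys : (PySem.Dict.counter ys).keys = PySem.List.dedup ys := by
    rw [PySem.Dict.keys_counter, ← PySem.List.dedup_eq_ofList]
  have hne : PySem.List.dedup ys ≠ [] := by
    obtain ⟨a, t, hy⟩ := List.exists_cons_of_ne_nil h
    intro hL
    have ha : a ∈ PySem.List.dedup ys := (PySem.List.mem_dedup _ _).mpr (by rw [hy]; simp)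
    rw [hL] at ha
    simp at ha
  cases hL : PySem.List.dedup ys with
  | nil => exact absurd hL hne
  | cons k0 rest =>
    have hM0 : (rest.map (fun k => pvCnt ys k)).foldl max (pvCnt ys k0) = pvMx ys := by
      have hk0 : k0 ∈ ys := (PySem.List.mem_dedup _ _).mp (by rw [hL]; simp)
      have h1 : (1 : Int) ≤ pvCnt ys k0 := pvCnt_pos ys k0 hk0
      rw [List.foldl_map]
      unfold pvMx
      rw [hL, List.foldl_cons]
      have : max 0 (pvCnt ys k0) = pvCnt ys k0 := max_eq_right (by omega)
      rw [this]
    cases hm : PySem.List.max? (PySem.Dict.counter ys).values (fun v => v) with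
    | none =>
      exfalso
      rw [PySem.List.max?_eq_none_iff, hvals, hL] at hm
      simp at hm
    | some m =>
      have hmv : m = pvMx ys := by
        rw [hvals, hL, List.map_cons, PySem.List.max?_id_cons] at hm
        have := Option.some.inj hm
        rw [← this, hM0]
      rw [hkeys, hmv]
      show (PySem.List.dedup ys).foldl
          (fun s item => if ((PySem.Dict.counter ys).getD item 0 == pvMx ys) = true
            then s + item * (PySem.Dict.counter ys).getD item 0 else s) 0
        = pvSm ys * pvMx ys
      have hstep : ∀ (s k : Int), k ∈ PySem.List.dedup ys →
          (if (PySem.Dict.counter ys).getD k 0 == pvMx ys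
            then s + k * (PySem.Dict.counter ys).getD k 0 else s)
          = (if (fun k => pvCnt ys k == pvMx ys) k then s + k * pvMx ys else s) := by
        intro s k _
        have hgd : (PySem.Dict.counter ys).getD k 0 = pvCnt ys k := by
          rw [PySem.Dict.getD_counter]; rfl
        rw [hgd]
        by_cases hb : (pvCnt ys k == pvMx ys) = true
        · rw [if_pos hb, if_pos hb, beq_iff_eq.mp hb]
        · rw [if_neg hb, if_neg hb]
      refine Eq.trans (PySem.List.foldl_congr_mem _ _ _ _ hstep) ?_
      rw [PySem.List.foldl_if_eq_foldl_filter (fun k => pvCnt ys k == pvMx ys)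
          (f := fun s k => s + k * pvMx ys)]
      refine Eq.trans (PySem.List.foldl_add _ _ _) ?_
      rw [zero_add]
      unfold pvSm
      rw [List.sum_map_mul_right]
      simp

theorem maximumFrequency_spec : Claim_equal_maximumFrequency := by
  intro input _ hpre
  unfold Spec_maximumFrequency
  rw [pvA_val input hpre, pvAlt_val input, mul_comm]
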